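-- pv_equiv track=rewrite | github.com/ecw74/advent-of-code | 2023/day-07/part-2.py | categorize_hands
-- ===== SOURCE A (Python) =====
-- def determine_hand_type(hand):
--     """
--     Determines the type of a given hand of cards, considering Jokers.
--
--     :param hand: String representing a hand of cards.
--     :return: The type of the hand.
--
--     >>> determine_hand_type("JJJJJ")
--     'Five of a kind'
--     >>> determine_hand_type("2J299")
--     'Full house'
--     """
--
--     def count_hand(hand_counts):
--         unique_counts = set(hand_counts.values())
--
--         if 5 in unique_counts:
--             return "Five of a kind"
--         elif 4 in unique_counts:
--             return "Four of a kind"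
--         elif 3 in unique_counts and 2 in unique_counts:
--             return "Full house"
--         elif 3 in unique_counts:
--             return "Three of a kind"
--         elif list(hand_counts.values()).count(2) == 2:
--             return "Two pair"
--         elif 2 in unique_counts:
--             return "One pair"
--         else:
--             return "High card"
--
--     # Special case: All Jokers
--     if hand == "JJJJJ":
--         return "Five of a kind"
--
--     # Count the occurrences of each card excluding J
--     counts = {}
--     j_count = 0
--     for card in hand:
--         if card == 'J':
--             j_count += 1
--         else:
--             counts[card] = counts.get(card, 0) + 1
--
--     # If there are no J's, simply count the hand
--     if j_count == 0:
--         return count_hand(counts)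
--
--     # Try replacing J's with each card to find the best hand
--     best_hand = "High card"
--     for card in counts:
--         temp_counts = counts.copy()
--         temp_counts[card] += j_count
--         hand_type = count_hand(temp_counts)
--         if hand_type == "Five of a kind":
--             return hand_type  # Can't do better than this
--         if hand_type == "Four of a kind" and best_hand != "Five of a kind":
--             best_hand = hand_type
--         elif hand_type == "Full house" and best_hand not in ["Five of a kind", "Four of a kind"]:
--             best_hand = hand_type
--         elif hand_type == "Three of a kind" and best_hand not in ["Five of a kind", "Four of a kind", "Full house"]:
--             best_hand = hand_type
--         elif hand_type == "Two pair" and best_hand not in ["Five of a kind", "Four of a kind", "Full house", "Three of a kind"]: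
--             best_hand = hand_type
--         elif hand_type == "One pair" and best_hand not in ["Five of a kind", "Four of a kind", "Full house", "Three of a kind", "Two pair"]:
--             best_hand = hand_type
--
--     # If no J's can improve the hand, count it as it is
--     if best_hand == "High card":
--         return count_hand(counts)
--     else:
--         return best_hand
--
-- def categorize_hands(card_hands):
--     """
--     Categorizes a list of card hands into different types.
--
--     :param card_hands: List of strings where each string represents a hand of cards.
--     :return: Dictionary categorizing each hand into one of the seven types.
--
--     >>> categorize_hands(["JJJJJ", "2J299", "89JKK", "55J77", "QQQ2J", "8A383", "9A383", "23456"])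
--     {'Five of a kind': ['JJJJJ'], 'Four of a kind': ['QQQ2J'], 'Full house': ['2J299', '55J77'], 'Three of a kind': ['89JKK'], 'Two pair': ['8A383'], 'One pair': ['9A383'], 'High card': ['23456']}
--     """
--     categories = {
--         "Five of a kind": [],
--         "Four of a kind": [],
--         "Full house": [],
--         "Three of a kind": [],
--         "Two pair": [],
--         "One pair": [],
--         "High card": []
--     }
--
--     for hand in card_hands:
--         cat = determine_hand_type(hand)
--         categories[cat].append(hand)
--     return categories
-- ===== SOURCE B (Python) =====
-- # B: merge all jokers into the most frequent non-joker card and classify once,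
-- # instead of A's try-every-card replacement loop with its priority cascade.
--
-- def _count_hand(hand_counts):
--     unique_counts = set(hand_counts.values())
--     if 5 in unique_counts:
--         return "Five of a kind"
--     elif 4 in unique_counts:
--         return "Four of a kind"
--     elif 3 in unique_counts and 2 in unique_counts:
--         return "Full house"
--     elif 3 in unique_counts:
--         return "Three of a kind"
--     elif list(hand_counts.values()).count(2) == 2:
--         return "Two pair"
--     elif 2 in unique_counts:
--         return "One pair"
--     else:
--         return "High card"
--
-- def _hand_type(hand):
--     cards = list(hand)
--     j = cards.count('J')
--     counts = {c: cards.count(c) for c in cards if c != 'J'}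
--     if j:
--         if not counts:
--             return "Five of a kind"  # every card is a joker
--         top = max(counts, key=counts.get)
--         counts[top] += j
--     return _count_hand(counts)
--
-- def categorize_hands(card_hands):
--     types = [_hand_type(h) for h in card_hands]
--     return {name: [h for h, t in zip(card_hands, types) if t == name]
--             for name in ("Five of a kind", "Four of a kind", "Full house",
--                          "Three of a kind", "Two pair", "One pair", "High card")}
-- ===== Notes on version B (the rewrite author's own statement) =====
-- stated objective: simpler
-- what changed: B adds all jokers to the most frequent non-joker card and classifies the resulting counts once, eliminating A's try-every-card replacement loop and its seven-way string priority cascade; the result dict is built by per-category filtering instead of appending into a preseeded dict.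
-- intended difference: On hands consisting entirely of jokers but not exactly 'JJJJJ', and on degenerate longer-than-five-card hands where some card's count plus the joker count reaches six, A's replacement loop returns accidental values (e.g. it files 'J' under 'High card'); B returns the type of the direct joker merge ('Five of a kind' for an all-joker hand), the intended reading. — e.g. on categorize_hands(["J"]): A returns [("Five of a kind", []), ("Four of a kind", []), ("Full house", []), ("Three of a kind", []), ("Two pair", []), ("One p…, B returns [("Five of a kind", ["J"]), ("Four of a kind", []), ("Full house", []), ("Three of a kind", []), ("Two pair", []), ("On…
import Mathlib
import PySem

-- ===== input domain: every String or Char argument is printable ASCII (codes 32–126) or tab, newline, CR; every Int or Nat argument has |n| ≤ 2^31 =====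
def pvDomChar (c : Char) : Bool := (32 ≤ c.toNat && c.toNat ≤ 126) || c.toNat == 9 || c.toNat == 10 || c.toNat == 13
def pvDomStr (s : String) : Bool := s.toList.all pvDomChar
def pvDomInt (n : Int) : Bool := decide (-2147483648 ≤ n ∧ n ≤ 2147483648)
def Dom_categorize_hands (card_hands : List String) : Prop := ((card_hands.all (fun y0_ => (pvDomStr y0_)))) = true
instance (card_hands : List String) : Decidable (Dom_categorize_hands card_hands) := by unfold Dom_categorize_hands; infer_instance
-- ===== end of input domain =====

-- B merges all jokers into the most frequent non-joker card and classifies once,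
-- replacing A's try-every-card replacement loop and its priority cascade (objective: simpler).

-- ===== PORT A =====
-- count_hand (inner helper of determine_hand_type; Source B's _count_hand is the same code, so both ports share it)
def pvCountHand (hand_counts : PySem.Dict Char Int) : String :=
  let unique_counts : PySem.Set Int := PySem.Set.ofList hand_counts.values
  if (5 : Int) ∈ unique_counts then "Five of a kind"
  else if (4 : Int) ∈ unique_counts then "Four of a kind"
  else if (3 : Int) ∈ unique_counts ∧ (2 : Int) ∈ unique_counts then "Full house"
  else if (3 : Int) ∈ unique_counts then "Three of a kind"
  else if hand_counts.values.count 2 = 2 then "Two pair"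
  else if (2 : Int) ∈ unique_counts then "One pair"
  else "High card"

-- the 'for card in counts' loop with its early return and the trailing
-- 'if best_hand == "High card"' fallback folded into the base case
def pvLoopA (counts : PySem.Dict Char Int) (j : Int) : List Char → String → String
  | [], best_hand => if best_hand == "High card" then pvCountHand counts else best_hand
  | card :: rest, best_hand =>
    let temp_counts := counts.modify card 0 (· + j)
    let hand_type := pvCountHand temp_counts
    if hand_type == "Five of a kind" then hand_type
    else
      let best' :=
        if hand_type == "Four of a kind" && !(best_hand == "Five of a kind") then hand_type
        else if hand_type == "Full house" && !(["Five of a kind", "Four of a kind"].contains best_hand) then hand_type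
        else if hand_type == "Three of a kind" && !(["Five of a kind", "Four of a kind", "Full house"].contains best_hand) then hand_type
        else if hand_type == "Two pair" && !(["Five of a kind", "Four of a kind", "Full house", "Three of a kind"].contains best_hand) then hand_type
        else if hand_type == "One pair" && !(["Five of a kind", "Four of a kind", "Full house", "Three of a kind", "Two pair"].contains best_hand) then hand_type
        else best_hand
      pvLoopA counts j rest best'

def pvDetermineHandType (hand : String) : String :=
  if hand == "JJJJJ" then "Five of a kind"
  else
    let st := hand.toList.foldl
      (fun (st : PySem.Dict Char Int × Int) card =>
        if card == 'J' then (st.1, st.2 + 1)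
        else (st.1.insert card (st.1.getD card 0 + 1), st.2))
      ((PySem.Dict.empty : PySem.Dict Char Int), (0 : Int))
    if st.2 == 0 then pvCountHand st.1
    else pvLoopA st.1 st.2 st.1.keys "High card"

def categorize_hands (card_hands : List String) : List (String × List String) :=
  let categories : PySem.Dict String (List String) := PySem.Dict.ofList
    [("Five of a kind", []), ("Four of a kind", []), ("Full house", []),
     ("Three of a kind", []), ("Two pair", []), ("One pair", []), ("High card", [])]
  (card_hands.foldl
    (fun d hand => d.modify (pvDetermineHandType hand) [] (fun l => l ++ [hand]))
    categories).items

-- ===== PORT B =====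
def pvHandTypeB (hand : String) : String :=
  let cards := hand.toList
  let j : Int := (PySem.List.count cards 'J' : Int)
  -- {c: cards.count(c) for c in cards if c != 'J'}
  let counts := cards.foldl
    (fun (d : PySem.Dict Char Int) c =>
      if c == 'J' then d else d.insert c (PySem.List.count cards c : Int))
    PySem.Dict.empty
  if j ≠ 0 then
    if counts.size = 0 then "Five of a kind"  -- every card is a joker
    else
      match PySem.List.max? counts.keys (fun k => counts.getD k 0) with
      | some top => pvCountHand (counts.modify top 0 (· + j))
      | none => "Five of a kind"  -- unreachable: counts is nonempty here
  else pvCountHand counts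

def categorize_hands_alt (card_hands : List String) : List (String × List String) :=
  let types := card_hands.map pvHandTypeB
  ["Five of a kind", "Four of a kind", "Full house", "Three of a kind",
   "Two pair", "One pair", "High card"].map
    (fun name => (name, ((card_hands.zip types).filter (fun ht => ht.2 == name)).map (fun ht => ht.1)))

-- ===== PRECONDITION & SPEC =====
-- On hands consisting entirely of jokers but not exactly "JJJJJ", and on degenerate
-- longer-than-five-card hands where some card's count plus the joker count reaches six,
-- A's replacement loop returns accidental values (e.g. it files "J" under "High card");
-- B returns the type of the direct joker merge ("Five of a kind" for an all-joker hand),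
-- the intended reading.
def D_categorize_hands (card_hands : List String) : Prop :=
  ∃ h ∈ card_hands,
    1 ≤ h.toList.count 'J' ∧
      ((h.toList.filter (fun c => !(c == 'J')) = [] ∧ ¬(h = "JJJJJ")) ∨
        ∃ c ∈ h.toList.filter (fun c => !(c == 'J')),
          6 ≤ (h.toList.filter (fun c => !(c == 'J'))).count c + h.toList.count 'J')
instance (card_hands : List String) : Decidable (D_categorize_hands card_hands) := by
  unfold D_categorize_hands; infer_instance

def Spec_categorize_hands (card_hands : List String) (out : List (String × List String)) : Prop :=
  ¬ D_categorize_hands card_hands → out = categorize_hands_alt card_hands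
instance (card_hands : List String) (out : List (String × List String)) : Decidable (Spec_categorize_hands card_hands out) := by unfold Spec_categorize_hands; infer_instance

def pvDiffWitness_categorize_hands : List String := ["J"]
def pvDiffWitnessOut_categorize_hands : (List (String × List String)) × (List (String × List String)) :=
  ([("Five of a kind", []), ("Four of a kind", []), ("Full house", []),
    ("Three of a kind", []), ("Two pair", []), ("One pair", []), ("High card", ["J"])],
   [("Five of a kind", ["J"]), ("Four of a kind", []), ("Full house", []),
    ("Three of a kind", []), ("Two pair", []), ("One pair", []), ("High card", [])])

-- ===== CLAIM (what is proved, stated in full; the proofs are below) =====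
def Claim_unchanged_categorize_hands : Prop := ∀ (card_hands : List String), Dom_categorize_hands card_hands → Spec_categorize_hands card_hands (categorize_hands card_hands)
def Claim_changed_categorize_hands : Prop := Dom_categorize_hands (pvDiffWitness_categorize_hands) ∧ D_categorize_hands (pvDiffWitness_categorize_hands) ∧ categorize_hands (pvDiffWitness_categorize_hands) = pvDiffWitnessOut_categorize_hands.1 ∧ categorize_hands_alt (pvDiffWitness_categorize_hands) = pvDiffWitnessOut_categorize_hands.2 ∧ pvDiffWitnessOut_categorize_hands.1 ≠ pvDiffWitnessOut_categorize_hands.2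

-- ===== LEMMAS AND PROOFS =====

-- numeric rank of a multiset of card counts (proof-side view of pvCountHand)
def pvClassify (values : List Int) : Nat :=
  if (5 : Int) ∈ values then 6
  else if (4 : Int) ∈ values then 5
  else if (3 : Int) ∈ values then (if (2 : Int) ∈ values then 4 else 3)
  else if values.count 2 = 2 then 2
  else if (2 : Int) ∈ values then 1
  else 0

-- category name of a numeric rank (proof-side bridge)
def pvNm : Nat → String
  | 0 => "High card"
  | 1 => "One pair"
  | 2 => "Two pair"
  | 3 => "Three of a kind"
  | 4 => "Full house"
  | 5 => "Four of a kind"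
  | _ => "Five of a kind"

lemma pvClassify_le (l : List Int) : pvClassify l ≤ 6 := by
  unfold pvClassify; split_ifs <;> omega

lemma pvClassify_perm {l₁ l₂ : List Int} (h : l₁.Perm l₂) : pvClassify l₁ = pvClassify l₂ := by
  unfold pvClassify
  simp [h.mem_iff, h.count_eq]

lemma pvCountHand_eq (d : PySem.Dict Char Int) : pvCountHand d = pvNm (pvClassify d.values) := by
  unfold pvCountHand pvClassify
  simp only [PySem.Set.mem_ofList]
  split_ifs <;> simp [pvNm] <;> tauto

lemma foldl_max_le_nat {α : Type} (l : List α) (f : α → Nat) (init m : Nat)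
    (h0 : init ≤ m) (h : ∀ x ∈ l, f x ≤ m) :
    l.foldl (fun a x => max a (f x)) init ≤ m := by
  induction l generalizing init with
  | nil => exact h0
  | cons x t ih =>
    simp only [List.foldl_cons]
    exact ih (max init (f x)) (max_le h0 (h x (by simp))) (fun y hy => h y (by simp [hy]))

-- the counting loop over the hand splits into the non-J counter and the J count
lemma pvCountFold (cs : List Char) (d : PySem.Dict Char Int) (n : Int) :
    cs.foldl
      (fun (st : PySem.Dict Char Int × Int) c =>
        if c == 'J' then (st.1, st.2 + 1)
        else (st.1.insert c (st.1.getD c 0 + 1), st.2)) (d, n)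
    = ((cs.filter (fun c => !(c == 'J'))).foldl (fun d c => d.insert c (d.getD c 0 + 1)) d,
       n + (cs.count 'J' : Int)) := by
  induction cs generalizing d n with
  | nil => simp
  | cons c cs ih =>
    by_cases h : c = 'J'
    · subst h
      rw [List.foldl_cons, if_pos (by simp), ih]
      simp [Prod.ext_iff]
      ring
    · rw [List.foldl_cons, if_neg (by simp [h]), ih]
      simp [h]

-- values of the dict after bumping card c's count by j, as a multiset operation on the values
lemma pvBump_perm (cs' : List Char) (c : Char) (hc : c ∈ (PySem.Dict.counter cs' : PySem.Dict Char Int).keys) (j : Int) :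
    ((PySem.Dict.counter cs' : PySem.Dict Char Int).modify c 0 (· + j)).values.Perm
      (((PySem.Dict.counter cs' : PySem.Dict Char Int).values.erase ((cs'.count c : Int))) ++ [(cs'.count c : Int) + j]) := by
  have hnd : (PySem.Dict.counter cs' : PySem.Dict Char Int).keys.Nodup := PySem.Dict.nodup_keys_counter cs'
  have hcont : (PySem.Dict.counter cs' : PySem.Dict Char Int).contains c = true :=
    (PySem.Dict.contains_iff_mem_keys _ _).2 hc
  have hkeys : ((PySem.Dict.counter cs' : PySem.Dict Char Int).modify c 0 (· + j)).keys
      = (PySem.Dict.counter cs' : PySem.Dict Char Int).keys := by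
    rw [PySem.Dict.keys_modify]
    exact PySem.Dict.keys_insert_of_contains _ _ hcont
  have hndm : ((PySem.Dict.counter cs' : PySem.Dict Char Int).modify c 0 (· + j)).keys.Nodup := by
    rw [hkeys]; exact hnd
  obtain ⟨l1, l2, hsplit⟩ := List.append_of_mem hc
  have hmid := hnd
  rw [hsplit, List.nodup_middle] at hmid
  have hcnot : c ∉ l1 ++ l2 := (List.nodup_cons.mp hmid).1
  have hc1 : c ∉ l1 := fun h => hcnot (List.mem_append_left _ h)
  have hc2 : c ∉ l2 := fun h => hcnot (List.mem_append_right _ h)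
  have hv : (PySem.Dict.counter cs' : PySem.Dict Char Int).values
      = l1.map (fun k => ((cs'.count k : Int))) ++ ((cs'.count c : Int)) :: l2.map (fun k => ((cs'.count k : Int))) := by
    rw [PySem.Dict.values_eq_map_keys _ hnd 0, hsplit]
    simp [PySem.Dict.getD_counter]
  have hvm : ((PySem.Dict.counter cs' : PySem.Dict Char Int).modify c 0 (· + j)).values
      = l1.map (fun k => ((cs'.count k : Int))) ++ ((cs'.count c : Int) + j) :: l2.map (fun k => ((cs'.count k : Int))) := by
    rw [PySem.Dict.values_eq_map_keys _ hndm 0, hkeys, hsplit]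
    simp only [List.map_append, List.map_cons]
    rw [PySem.Dict.getD_modify _ c c 0 (· + j)]
    simp only [PySem.Dict.getD_counter]
    congr 1
    · apply List.map_congr_left
      intro k hk
      rw [PySem.Dict.getD_modify, if_neg (fun (he : k = c) => hc1 (he ▸ hk)), PySem.Dict.getD_counter]
    · congr 1
      apply List.map_congr_left
      intro k hk
      rw [PySem.Dict.getD_modify, if_neg (fun (he : k = c) => hc2 (he ▸ hk)), PySem.Dict.getD_counter]
  rw [hv, hvm]
  have e1 : ((l1.map (fun k => ((cs'.count k : Int)))) ++ ((cs'.count c : Int)) :: (l2.map (fun k => ((cs'.count k : Int))))).erase ((cs'.count c : Int))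
      |>.Perm ((l1.map (fun k => ((cs'.count k : Int)))) ++ (l2.map (fun k => ((cs'.count k : Int))))) := by
    have hp : ((l1.map (fun k => ((cs'.count k : Int)))) ++ ((cs'.count c : Int)) :: (l2.map (fun k => ((cs'.count k : Int))))).Perm
        (((cs'.count c : Int)) :: ((l1.map (fun k => ((cs'.count k : Int)))) ++ (l2.map (fun k => ((cs'.count k : Int)))))) :=
      List.perm_middle
    have := hp.erase ((cs'.count c : Int))
    simpa [List.erase_cons_head] using this
  refine List.Perm.trans List.perm_middle (List.Perm.trans (List.perm_append_singleton _ _).symm ?_)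
  exact (e1.append_right _).symm

-- the priority cascade is max on ranks
lemma pvCascade_eq (b r : Nat) (hb : b ≤ 5) (hr : r ≤ 5) :
    (if pvNm r == "Four of a kind" && !(pvNm b == "Five of a kind") then pvNm r
     else if pvNm r == "Full house" && !(["Five of a kind", "Four of a kind"].contains (pvNm b)) then pvNm r
     else if pvNm r == "Three of a kind" && !(["Five of a kind", "Four of a kind", "Full house"].contains (pvNm b)) then pvNm r
     else if pvNm r == "Two pair" && !(["Five of a kind", "Four of a kind", "Full house", "Three of a kind"].contains (pvNm b)) then pvNm r
     else if pvNm r == "One pair" && !(["Five of a kind", "Four of a kind", "Full house", "Three of a kind", "Two pair"].contains (pvNm b)) then pvNm r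
     else pvNm b) = pvNm (max b r) := by
  interval_cases b <;> interval_cases r <;> rfl

lemma pvNm_ne_five {r : Nat} (hr : r ≤ 5) : (pvNm r == "Five of a kind") = false := by
  interval_cases r <;> rfl

lemma pvNm_high_iff {b : Nat} (hb : b ≤ 5) : (pvNm b == "High card") = decide (b = 0) := by
  interval_cases b <;> rfl

lemma pvLoopA_eq (counts : PySem.Dict Char Int) (j : Int) (rk : Char → Nat) (ks : List Char)
    (hrk : ∀ c ∈ ks, pvCountHand (counts.modify c 0 (· + j)) = pvNm (rk c) ∧ rk c ≤ 6)
    (b : Nat) (hb : b ≤ 5) :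
    pvLoopA counts j ks (pvNm b)
      = (if ks.foldl (fun a c => max a (rk c)) b = 0 then pvCountHand counts
         else pvNm (ks.foldl (fun a c => max a (rk c)) b)) := by
  induction ks generalizing b with
  | nil =>
    simp only [pvLoopA, List.foldl_nil, pvNm_high_iff hb]
    by_cases h : b = 0 <;> simp [h]
  | cons c rest ih =>
    obtain ⟨hty, hle⟩ := hrk c (by simp)
    have hrest : ∀ x ∈ rest, pvCountHand (counts.modify x 0 (· + j)) = pvNm (rk x) ∧ rk x ≤ 6 :=
      fun x hx => hrk x (List.mem_cons_of_mem _ hx)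
    rw [List.foldl_cons]
    simp only [pvLoopA]
    rw [hty]
    by_cases h6 : rk c = 6
    · rw [h6]
      have hfive : (pvNm 6 == "Five of a kind") = true := by decide
      rw [hfive]
      have hm : rest.foldl (fun a x => max a (rk x)) (max b 6) = 6 := by
        refine le_antisymm (foldl_max_le_nat _ _ _ _ (by omega) (fun x hx => (hrest x hx).2)) ?_
        calc (6 : Nat) ≤ max b 6 := by omega
          _ ≤ _ := (PySem.List.le_foldl_max_nat rest rk (max b 6)).1
      rw [hm]
      simp [pvNm]
    · have hr5 : rk c ≤ 5 := by omega
      rw [pvNm_ne_five hr5]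
      simp only [Bool.false_eq_true, if_false]
      rw [pvCascade_eq b (rk c) hb hr5]
      exact ih hrest (max b (rk c)) (by omega)

-- ---- rank characterizations ----

lemma pvGe6 {W : List Int} (h : (5 : Int) ∈ W) : pvClassify W = 6 := by
  unfold pvClassify; rw [if_pos h]

lemma pvGe5 {W : List Int} (h : (4 : Int) ∈ W) : 5 ≤ pvClassify W := by
  unfold pvClassify; split_ifs <;> omega

lemma pvGe3 {W : List Int} (h3 : (3 : Int) ∈ W) : 3 ≤ pvClassify W := by
  unfold pvClassify; split_ifs <;> omega

lemma pvGe1 {W : List Int} (h2 : (2 : Int) ∈ W) : 1 ≤ pvClassify W := by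
  unfold pvClassify; split_ifs <;> omega

lemma pvInv6 {W : List Int} (h : pvClassify W = 6) : (5 : Int) ∈ W := by
  by_contra hn; unfold pvClassify at h; split_ifs at h <;> omega

lemma pvInv5 {W : List Int} (h : pvClassify W = 5) : (4 : Int) ∈ W := by
  by_contra hn; unfold pvClassify at h; split_ifs at h <;> omega

lemma pvInv4 {W : List Int} (h : pvClassify W = 4) : (3 : Int) ∈ W ∧ (2 : Int) ∈ W := by
  by_contra hn; unfold pvClassify at h; split_ifs at h <;> first | omega | tauto

-- membership in (V.erase v ++ [t])
lemma pvMemBump {V : List Int} {v x t : Int} (hx : x ∈ V.erase v ++ [t]) :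
    x = t ∨ x ∈ V := by
  rcases List.mem_append.mp hx with h | h
  · exact Or.inr (List.mem_of_mem_erase h)
  · simp at h; exact Or.inl h

lemma pvBumpT (V : List Int) (v t : Int) : t ∈ V.erase v ++ [t] := by simp

-- bumping the maximal count is at least as good as bumping any count (when the bumped maximum stays ≤ 5)
lemma pvKey (V : List Int) (v m j : Int) (hv : v ∈ V)
    (hmax : ∀ x ∈ V, x ≤ m) (hpos : ∀ x ∈ V, 1 ≤ x) (hj : 1 ≤ j) (h5 : m + j ≤ 5) :
    pvClassify (V.erase v ++ [v + j]) ≤ pvClassify (V.erase m ++ [m + j]) := by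
  by_cases hvm : v = m
  · subst hvm; exact le_rfl
  · have hlt : v < m := lt_of_le_of_ne (hmax v hv) hvm
    have hv1 : 1 ≤ v := hpos v hv
    have hmj3 : 3 ≤ m + j := by omega
    have hcase : m + j = 3 ∨ m + j = 4 ∨ m + j = 5 := by omega
    have hT : (m + j) ∈ V.erase m ++ [m + j] := pvBumpT V m (m + j)
    rcases hcase with h | h | h
    · -- bumped maximum is a 3: the left side can reach at most Three of a kind
      have h2 : 3 ≤ pvClassify (V.erase m ++ [m + j]) := pvGe3 (by rw [h] at hT; rw [h]; exact hT)
      have h1 : pvClassify (V.erase v ++ [v + j]) ≤ 3 := by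
        by_contra hgt
        have hle6 := pvClassify_le (V.erase v ++ [v + j])
        have : pvClassify (V.erase v ++ [v + j]) = 4 ∨ pvClassify (V.erase v ++ [v + j]) = 5 ∨
            pvClassify (V.erase v ++ [v + j]) = 6 := by omega
        rcases this with h4 | h4 | h4
        · rcases pvMemBump (pvInv4 h4).1 with he | hV
          · omega
          · have := hmax 3 hV; omega
        · rcases pvMemBump (pvInv5 h4) with he | hV
          · omega
          · have := hmax 4 hV; omega
        · rcases pvMemBump (pvInv6 h4) with he | hV
          · omega
          · have := hmax 5 hV; omega
      omega
    · -- bumped maximum is a 4: the left side can reach at most Four of a kind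
      have h2 : 5 ≤ pvClassify (V.erase m ++ [m + j]) := pvGe5 (by rw [h] at hT; rw [h]; exact hT)
      have h1 : pvClassify (V.erase v ++ [v + j]) ≤ 5 := by
        by_contra hgt
        have hle6 := pvClassify_le (V.erase v ++ [v + j])
        have h4 : pvClassify (V.erase v ++ [v + j]) = 6 := by omega
        rcases pvMemBump (pvInv6 h4) with he | hV
        · omega
        · have := hmax 5 hV; omega
      omega
    · -- bumped maximum is a 5: Five of a kind beats everything
      have h2 : pvClassify (V.erase m ++ [m + j]) = 6 := pvGe6 (by rw [h] at hT; rw [h]; exact hT)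
      have := pvClassify_le (V.erase v ++ [v + j])
      omega

-- ---- B's comprehension dict is the non-J counter ----

lemma pvFoldlSkip {α β : Type} (l : List α) (p : α → Bool) (f : β → α → β) (init : β) :
    l.foldl (fun d x => if p x then d else f d x) init
      = (l.filter (fun x => !p x)).foldl f init := by
  induction l generalizing init with
  | nil => rfl
  | cons a t ih => by_cases h : p a <;> simp [h, ih]

lemma pvGetDInsertConst (l : List Char) (v : Char → Int) (d : PySem.Dict Char Int) (k : Char) :
    (l.foldl (fun d c => d.insert c (v c)) d).getD k 0
      = if k ∈ l then v k else d.getD k 0 := by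
  induction l generalizing d with
  | nil => simp
  | cons a t ih =>
    rw [List.foldl_cons, ih]
    by_cases hkt : k ∈ t
    · simp [hkt]
    · by_cases hka : k = a
      · subst hka; simp [hkt, PySem.Dict.getD_insert_self]
      · rw [if_neg hkt, if_neg (by simp [hka, hkt])]
        exact PySem.Dict.getD_insert_of_ne d (v a) 0 hka

lemma pvBDict (cs : List Char) :
    cs.foldl
      (fun (d : PySem.Dict Char Int) c =>
        if c == 'J' then d else d.insert c (PySem.List.count cs c : Int))
      PySem.Dict.empty
    = PySem.Dict.counter (cs.filter (fun c => !(c == 'J'))) := by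
  rw [pvFoldlSkip]
  apply PySem.Dict.ext
  have hndL : ((cs.filter (fun c => !(c == 'J'))).foldl
      (fun (d : PySem.Dict Char Int) c => d.insert c (PySem.List.count cs c : Int))
      PySem.Dict.empty).keys.Nodup := by
    exact PySem.Dict.nodup_keys_foldl_insert _ _ _ (by simp [PySem.Dict.keys_empty])
  have hndR : (PySem.Dict.counter (cs.filter (fun c => !(c == 'J'))) : PySem.Dict Char Int).keys.Nodup :=
    PySem.Dict.nodup_keys_counter _
  have hkeys : ((cs.filter (fun c => !(c == 'J'))).foldl
      (fun (d : PySem.Dict Char Int) c => d.insert c (PySem.List.count cs c : Int))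
      PySem.Dict.empty).keys
      = (PySem.Dict.counter (cs.filter (fun c => !(c == 'J'))) : PySem.Dict Char Int).keys := by
    rw [PySem.Dict.keys_foldl_insert, PySem.Dict.keys_counter, PySem.Dict.keys_empty,
      PySem.Set.update_eq_append_filter]
    simp [PySem.Set.contains]
  rw [PySem.Dict.items_eq_map_keys _ hndL 0, PySem.Dict.items_eq_map_keys _ hndR 0, hkeys]
  apply List.map_congr_left
  intro k hk
  have hkmem : k ∈ cs.filter (fun c => !(c == 'J')) := by
    rw [PySem.Dict.keys_counter] at hk
    exact (PySem.Set.mem_ofList _ _).1 hk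
  have hkJ : ¬(k = 'J') := by
    have := List.of_mem_filter hkmem
    simpa using this
  rw [pvGetDInsertConst, if_pos hkmem, PySem.Dict.getD_counter, PySem.List.count_eq,
    List.count_filter]
  simp [hkJ]

-- every category A or B can produce is one of the seven names
lemma pvNm_mem (r : Nat) : pvNm r ∈ (["Five of a kind", "Four of a kind", "Full house",
    "Three of a kind", "Two pair", "One pair", "High card"] : List String) := by
  match r with
  | 0 => decide
  | 1 => decide
  | 2 => decide
  | 3 => decide
  | 4 => decide
  | 5 => decide
  | (n + 6) => simp [pvNm]

lemma pvCountHand_mem (d : PySem.Dict Char Int) :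
    pvCountHand d ∈ (["Five of a kind", "Four of a kind", "Full house", "Three of a kind",
      "Two pair", "One pair", "High card"] : List String) := by
  rw [pvCountHand_eq]; exact pvNm_mem _

lemma pvHandTypeB_mem (h : String) :
    pvHandTypeB h ∈ (["Five of a kind", "Four of a kind", "Full house", "Three of a kind",
      "Two pair", "One pair", "High card"] : List String) := by
  unfold pvHandTypeB
  dsimp only
  split_ifs
  · simp
  · split
    · exact pvCountHand_mem _
    · simp
  · exact pvCountHand_mem _

-- ---- the per-hand equality outside the change region ----

lemma pvHand (h : String)
    (hP : ¬(1 ≤ h.toList.count 'J' ∧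
      ((h.toList.filter (fun c => !(c == 'J')) = [] ∧ ¬(h = "JJJJJ")) ∨
        ∃ c ∈ h.toList.filter (fun c => !(c == 'J')),
          6 ≤ (h.toList.filter (fun c => !(c == 'J'))).count c + h.toList.count 'J'))) :
    pvDetermineHandType h = pvHandTypeB h := by
  by_cases hJ : h = "JJJJJ"
  · subst hJ; decide
  · have hbeq : (h == "JJJJJ") = false := by simp [hJ]
    unfold pvDetermineHandType pvHandTypeB
    rw [hbeq]
    simp only [Bool.false_eq_true, if_false]
    rw [pvCountFold, PySem.Dict.foldl_insert_getD_add_one_eq_counter, pvBDict]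
    simp only [zero_add, PySem.List.count_eq]
    set cs := h.toList with hcs
    set cs' : List Char := cs.filter (fun c => !(c == 'J')) with hcs'
    by_cases hj : cs.count 'J' = 0
    · simp [hj]
    · have hj1 : 1 ≤ cs.count 'J' := by omega
      have hjz : ((cs.count 'J' : Int) == 0) = false := by
        simp only [beq_eq_false_iff_ne, ne_eq, Nat.cast_eq_zero]; exact hj
      have hjnz : ¬((cs.count 'J' : Int) = 0) := by simpa using hjz
      rw [hjz]
      simp only [Bool.false_eq_true, if_false, if_pos hjnz]
      have hbig : ∀ c ∈ cs', cs'.count c + cs.count 'J' ≤ 5 := by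
        intro c hc
        by_contra hgt
        exact hP ⟨hj1, Or.inr ⟨c, hc, by omega⟩⟩
      have hne : cs' ≠ [] := by
        intro hnil
        exact hP ⟨hj1, Or.inl ⟨hnil, hJ⟩⟩
      set cnts : PySem.Dict Char Int := PySem.Dict.counter cs' with hcnts
      set jz : Int := ((cs.count 'J' : Int)) with hjzdef
      have hjz1 : 1 ≤ jz := by rw [hjzdef]; exact_mod_cast hj1
      have hkeysS : cnts.keys = PySem.Set.ofList cs' := PySem.Dict.keys_counter cs'
      have hkne : cnts.keys ≠ [] := by
        obtain ⟨c, hc⟩ := List.exists_mem_of_ne_nil cs' hne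
        intro h0
        have hmem : c ∈ cnts.keys := by rw [hkeysS]; exact (PySem.Set.mem_ofList _ _).2 hc
        rw [h0] at hmem
        exact absurd hmem (List.not_mem_nil)
      have hsz : ¬(cnts.size = 0) := by
        intro h0
        apply hkne
        have hlen : cnts.keys.length = 0 := by simp [PySem.Dict.keys, PySem.Dict.size] at h0 ⊢; omega
        exact List.eq_nil_of_length_eq_zero hlen
      rw [if_neg hsz]
      obtain ⟨top, htop⟩ : ∃ t, PySem.List.max? cnts.keys (fun k => cnts.getD k 0) = some t := by
        cases hmx : PySem.List.max? cnts.keys (fun k => cnts.getD k 0) with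
        | none => exact absurd ((PySem.List.max?_eq_none_iff _ _).mp hmx) hkne
        | some t => exact ⟨t, rfl⟩
      rw [htop]
      dsimp only
      have htopk : top ∈ cnts.keys := PySem.List.max?_mem htop
      have htmax : ∀ k ∈ cnts.keys, cnts.getD k 0 ≤ cnts.getD top 0 := PySem.List.max?_isMax htop
      have htopcs : top ∈ cs' := by
        rw [hkeysS] at htopk; exact (PySem.Set.mem_ofList _ _).1 htopk
      -- per-key candidate ranks for A's loop
      have hrk : ∀ c ∈ cnts.keys,
          pvCountHand (cnts.modify c 0 (· + jz))
            = pvNm (pvClassify ((cnts.values.erase ((cs'.count c : Int))) ++ [(cs'.count c : Int) + jz]))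
          ∧ pvClassify ((cnts.values.erase ((cs'.count c : Int))) ++ [(cs'.count c : Int) + jz]) ≤ 6 := by
        intro c hc
        refine ⟨?_, pvClassify_le _⟩
        rw [pvCountHand_eq, pvClassify_perm (pvBump_perm cs' c hc jz)]
      have hhigh : ("High card" : String) = pvNm 0 := rfl
      rw [hhigh, pvLoopA_eq cnts jz
        (fun c => pvClassify ((cnts.values.erase ((cs'.count c : Int))) ++ [(cs'.count c : Int) + jz]))
        cnts.keys hrk 0 (by omega)]
      have hkeyval : cnts.values = cnts.keys.map (fun k => ((cs'.count k : Int))) := by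
        rw [hcnts, PySem.Dict.values_eq_map_keys _ (PySem.Dict.nodup_keys_counter cs') 0]
        exact List.map_congr_left (fun k _ => PySem.Dict.getD_counter cs' k)
      have hfoldv : cnts.keys.foldl
            (fun a c => max a (pvClassify ((cnts.values.erase ((cs'.count c : Int))) ++ [(cs'.count c : Int) + jz]))) 0
          = cnts.values.foldl
            (fun a v => max a (pvClassify ((cnts.values.erase v) ++ [v + jz]))) 0 := by
        have hlm := List.foldl_map (f := fun k : Char => ((cs'.count k : Int)))
          (g := fun (a : Nat) (v : Int) => max a (pvClassify ((cnts.values.erase v) ++ [v + jz])))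
          (l := cnts.keys) (init := (0 : Nat))
        rw [← hkeyval] at hlm
        exact hlm.symm
      -- the maximal count and its candidate rank
      set M : Int := ((cs'.count top : Int)) with hM
      have hMgetD : cnts.getD top 0 = M := by rw [hcnts, PySem.Dict.getD_counter]
      have hMmem : M ∈ cnts.values := by
        rw [hkeyval]; exact List.mem_map.mpr ⟨top, htopk, rfl⟩
      have hvalmax : ∀ x ∈ cnts.values, x ≤ M := by
        intro x hx
        rw [hkeyval] at hx
        obtain ⟨k, hk, hkx⟩ := List.mem_map.mp hx
        have := htmax k hk
        rw [hMgetD] at this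
        rw [hcnts, PySem.Dict.getD_counter] at this
        omega
      have hvalpos : ∀ x ∈ cnts.values, 1 ≤ x := by
        intro x hx
        rw [hkeyval] at hx
        obtain ⟨k, hk, hkx⟩ := List.mem_map.mp hx
        rw [hkeysS] at hk
        have hkcs : k ∈ cs' := (PySem.Set.mem_ofList _ _).1 hk
        have : 0 < cs'.count k := List.count_pos_iff.mpr hkcs
        omega
      have hM5 : M + jz ≤ 5 := by
        have := hbig top htopcs
        rw [hM, hjzdef]
        exact_mod_cast this
      have hcand : ∀ v ∈ cnts.values,
          pvClassify ((cnts.values.erase v) ++ [v + jz]) ≤ pvClassify ((cnts.values.erase M) ++ [M + jz]) :=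
        fun v hv => pvKey cnts.values v M jz hv hvalmax hvalpos hjz1 hM5
      have hfoldM : cnts.values.foldl
            (fun a v => max a (pvClassify ((cnts.values.erase v) ++ [v + jz]))) 0
          = pvClassify ((cnts.values.erase M) ++ [M + jz]) := by
        refine le_antisymm (foldl_max_le_nat _ _ _ _ (Nat.zero_le _) hcand) ?_
        exact (PySem.List.le_foldl_max_nat cnts.values
          (fun v => pvClassify ((cnts.values.erase v) ++ [v + jz])) 0).2 M hMmem
      have hM1 : 1 ≤ pvClassify ((cnts.values.erase M) ++ [M + jz]) := by
        have hMr : 2 ≤ M + jz ∧ M + jz ≤ 5 := by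
          constructor
          · have := hvalpos M hMmem; omega
          · exact hM5
        have hTm : (M + jz) ∈ cnts.values.erase M ++ [M + jz] := pvBumpT cnts.values M (M + jz)
        have h22 : M + jz = 2 ∨ M + jz = 3 ∨ M + jz = 4 ∨ M + jz = 5 := by omega
        rcases h22 with h2 | h2 | h2 | h2
        · exact pvGe1 (by rw [h2] at hTm; rw [h2]; exact hTm)
        · have := pvGe3 (W := cnts.values.erase M ++ [M + jz]) (by rw [h2] at hTm; rw [h2]; exact hTm); omega
        · have := pvGe5 (W := cnts.values.erase M ++ [M + jz]) (by rw [h2] at hTm; rw [h2]; exact hTm); omega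
        · have := pvGe6 (W := cnts.values.erase M ++ [M + jz]) (by rw [h2] at hTm; rw [h2]; exact hTm); omega
      rw [hfoldv, hfoldM]
      rw [if_neg (by omega)]
      -- B's side: bump the argmax key and classify
      rw [pvCountHand_eq, pvClassify_perm (pvBump_perm cs' top htopk jz), hM]

-- helper lemmas for the final assembly
lemma pvZipFilter (l : List String) (f : String → String) (r : String) :
    (((l.zip (l.map f)).filter (fun hr => hr.2 == r)).map (fun hr => hr.1))
      = l.filter (fun h => f h == r) := by
  induction l with
  | nil => rfl
  | cons h t ih => by_cases hr : f h == r <;> simp [hr, ih]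

-- ===== VERDICT (by name: the statement is the Claim_ definition above) =====
theorem categorize_hands_spec : Claim_unchanged_categorize_hands := by
  intro hands _
  unfold Spec_categorize_hands
  intro hD
  have hdet : ∀ h ∈ hands, pvDetermineHandType h = pvHandTypeB h := by
    intro h hh
    apply pvHand
    intro hp
    exact hD ⟨h, hh, hp⟩
  unfold categorize_hands categorize_hands_alt
  set cat0 : PySem.Dict String (List String) := PySem.Dict.ofList
    [("Five of a kind", []), ("Four of a kind", []), ("Full house", []),
     ("Three of a kind", []), ("Two pair", []), ("One pair", []), ("High card", [])] with hcat0
  set names : List String := ["Five of a kind", "Four of a kind", "Full house",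
    "Three of a kind", "Two pair", "One pair", "High card"] with hnames
  set final := hands.foldl
    (fun d hand => d.modify (pvDetermineHandType hand) [] (fun l => l ++ [hand])) cat0 with hfinal
  have hfold : final
      = (hands.map (fun h => (pvDetermineHandType h, h))).foldl
          (fun d p => d.modify p.1 [] (fun l => l ++ [p.2])) cat0 := by
    rw [hfinal, List.foldl_map]
  have hkeys0 : cat0.keys = names := by rw [hcat0, hnames]; rfl
  have hkeys : final.keys = names := by
    rw [hfinal,
      PySem.Dict.keys_foldl_modify_key hands pvDetermineHandType []
        (fun d x => (fun l => l ++ [x])) cat0,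
      hkeys0, PySem.Set.update_eq_append_filter]
    have hnil : (PySem.Set.ofList (hands.map pvDetermineHandType)).filter
        (fun y => !(PySem.Set.contains names y)) = [] := by
      rw [List.filter_eq_nil_iff]
      intro y hy
      obtain ⟨h, hh, hTy⟩ := List.mem_map.mp ((PySem.Set.mem_ofList _ y).1 hy)
      have hmemy : y ∈ names := by
        rw [hnames, ← hTy, hdet h hh]
        exact pvHandTypeB_mem h
      simpa using hmemy
    rw [hnil, List.append_nil]
  have hnd : final.keys.Nodup := by rw [hkeys, hnames]; decide
  have hget : ∀ k ∈ names, final.getD k [] = hands.filter (fun h => pvDetermineHandType h == k) := by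
    intro k hk
    rw [hfold, PySem.Dict.getD_foldl_modify_append]
    have h0 : cat0.getD k [] = [] := by
      rw [hnames] at hk
      fin_cases hk <;> rw [hcat0] <;> rfl
    rw [h0, List.nil_append, List.filter_map, List.map_map]
    simp [Function.comp_def]
  have hitems : final.items = names.map (fun k => (k, hands.filter (fun h => pvDetermineHandType h == k))) := by
    rw [PySem.Dict.items_eq_map_keys final hnd [], hkeys]
    exact List.map_congr_left (fun k hk => by rw [hget k hk])
  rw [← hfinal] at *
  rw [hitems]
  simp only [pvZipFilter]
  apply List.map_congr_left
  intro k hk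
  refine Prod.ext rfl ?_
  exact List.filter_congr (fun h hh => by rw [hdet h hh])

theorem categorize_hands_changed : Claim_changed_categorize_hands := by
  unfold Claim_changed_categorize_hands; decide
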